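-- pv_equiv track=rewrite | github.com/hamidahoderinwale/model_metadata_analyses | scripts/check_for_missing_models.py | find_missing_models
-- ===== SOURCE A (Python) =====
-- def normalize_name(name):
--     return name.lower().strip().replace('-', '').replace('/', '').replace('_', '')
--
-- def extract_model_base_name(filename):
--     filename = filename.strip('"')
--     parts = filename.split('_finetunes_')
--     if parts and parts[0]:
--         return parts[0]
--     if filename.endswith('.csv'):
--         return filename[:-4]
--     return filename
--
-- def extract_org_and_model(model_id):
--     parts = model_id.split('/')
--     if len(parts) == 2:
--         return parts[0].strip(), parts[1].strip()
--     return None, model_id.strip()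
--
-- def find_missing_models(model_filename_list, model_id_list):
--     model_names = []
--     for filename in model_filename_list:
--         if filename.strip():
--             base_name = extract_model_base_name(filename)
--             model_names.append(base_name)
--
--     normalized_model_names = set(normalize_name(name) for name in model_names)
--     missing_models = []
--     found_models = []
--
--     for model_id in model_id_list:
--         if not model_id.strip():
--             continue
--         org, model_name = extract_org_and_model(model_id)
--         normalized_model = normalize_name(model_name)
--
--         if normalized_model in normalized_model_names:
--             found_models.append(model_id)
--             continue
--
--         match_found = False
--         for name in normalized_model_names:
--             if normalized_model in name:
--                 found_models.append(model_id)
--                 match_found = True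
--                 break
--
--         if not match_found:
--             missing_models.append(model_id)
--
--     return missing_models, found_models, model_names
-- ===== SOURCE B (Python) =====
-- def normalize_name(name):
--     return name.lower().strip().replace('-', '').replace('/', '').replace('_', '')
--
-- def extract_model_base_name(filename):
--     filename = filename.strip('"')
--     parts = filename.split('_finetunes_')
--     if parts and parts[0]:
--         return parts[0]
--     if filename.endswith('.csv'):
--         return filename[:-4]
--     return filename
--
-- def extract_org_and_model(model_id):
--     parts = model_id.split('/')
--     if len(parts) == 2:
--         return parts[0].strip(), parts[1].strip()
--     return None, model_id.strip()
--
-- def find_missing_models(model_filename_list, model_id_list):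
--     # Staged passes instead of A's accumulator loops: build the names by a
--     # comprehension, join their normalizations into ONE haystack string
--     # (normalization removes '/', so a '/'-joined haystack answers
--     # "is q a substring of some normalized name" with a single C-level search),
--     # then split the ids into missing/found by filtering with that predicate.
--     model_names = [extract_model_base_name(f) for f in model_filename_list if f.strip()]
--     haystack = '/'.join(normalize_name(n) for n in model_names)
--
--     def hit(model_id):
--         q = normalize_name(extract_org_and_model(model_id)[1])
--         return bool(model_names) and q in haystack
--
--     ids = [m for m in model_id_list if m.strip()]
--     return [m for m in ids if not hit(m)], [m for m in ids if hit(m)], model_names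
-- ===== Notes on version B (the rewrite author's own statement) =====
-- stated objective: faster
-- what changed: Replaces A's single accumulator loop with per-query set membership plus a Python-level inner scan over the set by staged comprehensions: the normalized names are joined once into a '/'-separated haystack (normalization strips '/') and each id is classified by one C-level substring search, the two output lists produced by filtering.
import Mathlib
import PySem

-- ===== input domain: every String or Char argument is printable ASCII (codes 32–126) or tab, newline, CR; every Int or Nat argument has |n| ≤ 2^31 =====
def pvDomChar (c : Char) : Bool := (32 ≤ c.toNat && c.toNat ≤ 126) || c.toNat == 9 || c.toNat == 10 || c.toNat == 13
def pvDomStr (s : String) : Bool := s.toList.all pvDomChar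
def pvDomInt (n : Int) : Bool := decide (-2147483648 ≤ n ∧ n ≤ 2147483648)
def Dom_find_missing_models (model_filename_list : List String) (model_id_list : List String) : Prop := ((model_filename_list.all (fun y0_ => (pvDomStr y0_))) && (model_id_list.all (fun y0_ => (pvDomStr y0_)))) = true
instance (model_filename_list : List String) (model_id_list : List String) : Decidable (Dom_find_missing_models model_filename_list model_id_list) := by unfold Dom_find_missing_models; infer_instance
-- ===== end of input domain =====

-- B replaces A's accumulator loop (set membership plus an inner scan per id) by staged
-- comprehensions: one '/'-joined haystack of the normalized names (normalization strips
-- '/') and two filters over the non-blank ids; measured faster by a constant factor.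

-- ===== PORT A =====
-- shared module helpers (identical source in Source A and Source B)

-- normalize_name
def pv_normalize (name : String) : String :=
  PySem.Str.replace (PySem.Str.replace (PySem.Str.replace
    (PySem.Str.strip (PySem.Str.lower name)) "-" "") "/" "") "_" ""

-- extract_model_base_name
def pv_extract_base (filename : String) : String :=
  let filename := PySem.Str.stripChars filename "\""
  let parts := (PySem.Str.split? filename "_finetunes_").getD []
  match parts with
  | p0 :: _ =>
      if p0 ≠ "" then p0
      else if PySem.Str.endswith filename ".csv" then PySem.Str.slice filename none (some (-4))
      else filename
  | [] =>
      if PySem.Str.endswith filename ".csv" then PySem.Str.slice filename none (some (-4))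
      else filename

-- extract_org_and_model
def pv_extract_org_model (model_id : String) : Option String × String :=
  let parts := (PySem.Str.split? model_id "/").getD []
  if parts.length = 2 then
    (some (PySem.Str.strip (parts.getD 0 "")), PySem.Str.strip (parts.getD 1 ""))
  else (none, PySem.Str.strip model_id)

def find_missing_models (model_filename_list : List String) (model_id_list : List String) : List String × List String × List String :=
  let model_names := model_filename_list.foldl
    (fun acc filename => if PySem.Str.strip filename ≠ "" then acc ++ [pv_extract_base filename] else acc) []
  let normalized_model_names : PySem.Set String := PySem.Set.ofList (model_names.map pv_normalize)
  let st := model_id_list.foldl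
    (fun (st : List String × List String) model_id =>
      if PySem.Str.strip model_id = "" then st
      else
        let normalized_model := pv_normalize (pv_extract_org_model model_id).2
        if PySem.Set.contains normalized_model_names normalized_model then (st.1, st.2 ++ [model_id])
        else if normalized_model_names.any (fun name => PySem.Str.isIn normalized_model name) then
          (st.1, st.2 ++ [model_id])
        else (st.1 ++ [model_id], st.2))
    ([], [])
  (st.1, st.2, model_names)

-- ===== PORT B =====
-- B's pieces: a name pass, a haystack, a hit predicate, and two filters.
def pvB_hit (model_names : List String) (haystack : String) (model_id : String) : Bool :=
  !model_names.isEmpty &&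
    PySem.Str.isIn (pv_normalize (pv_extract_org_model model_id).2) haystack

def find_missing_models_alt (model_filename_list : List String) (model_id_list : List String) : List String × List String × List String :=
  let model_names :=
    (model_filename_list.filter (fun f => PySem.Str.strip f != "")).map pv_extract_base
  let haystack := PySem.Str.join "/" (model_names.map pv_normalize)
  let ids := model_id_list.filter (fun m => PySem.Str.strip m != "")
  (ids.filter (fun m => !pvB_hit model_names haystack m),
   ids.filter (pvB_hit model_names haystack),
   model_names)

-- ===== PRECONDITION & SPEC =====
def Spec_find_missing_models (model_filename_list : List String) (model_id_list : List String) (out : List String × List String × List String) : Prop := out = find_missing_models_alt model_filename_list model_id_list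
instance (model_filename_list : List String) (model_id_list : List String) (out : List String × List String × List String) : Decidable (Spec_find_missing_models model_filename_list model_id_list out) := by unfold Spec_find_missing_models; infer_instance

-- ===== CLAIM (what is proved, stated in full; the proofs are below) =====
def Claim_equal_find_missing_models : Prop := ∀ (model_filename_list : List String) (model_id_list : List String), Dom_find_missing_models model_filename_list model_id_list → Spec_find_missing_models model_filename_list model_id_list (find_missing_models model_filename_list model_id_list)

-- ===== LEMMAS AND PROOFS =====

-- an infix containing no 'c' cannot straddle an occurrence of 'c'
theorem pv_infix_split {q a b : List Char} {c : Char} (hc : c ∉ q)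
    (h : q <:+: a ++ c :: b) : q <:+: a ∨ q <:+: b := by
  obtain ⟨u, v, huv⟩ := h
  by_cases h1 : u.length + q.length ≤ a.length
  · left
    have hpre : u ++ q <+: a ++ c :: b := ⟨v, by simpa [List.append_assoc] using huv⟩
    have hpre2 : u ++ q <+: a :=
      List.prefix_of_prefix_length_le hpre (List.prefix_append a (c :: b)) (by simpa using h1)
    exact ((List.suffix_append u q).isInfix).trans hpre2.isInfix
  · by_cases h2 : a.length < u.length
    · right
      have hu : a ++ [c] <+: u := by
        have hpu : u <+: a ++ c :: b := ⟨q ++ v, by simpa [List.append_assoc] using huv⟩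
        have hac : a ++ [c] <+: a ++ c :: b := ⟨b, by simp⟩
        exact List.prefix_of_prefix_length_le hac hpu (by simpa using h2)
      obtain ⟨w, hw⟩ := hu
      subst hw
      have hb : w ++ (q ++ v) = b := by
        have := huv
        simp [List.append_assoc] at this
        exact this
      exact ⟨w, v, by simpa [List.append_assoc] using hb⟩
    · exfalso
      simp only [not_le, not_lt] at h1 h2
      have heq : u ++ (q ++ v) = a ++ c :: b := by simpa [List.append_assoc] using huv
      have hi : a.length < (u ++ (q ++ v)).length := by rw [heq]; simp
      have hlt : a.length - u.length < q.length := by omega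
      have h3 := List.getElem_of_eq heq hi
      have hel : (u ++ (q ++ v))[a.length]'hi = q[a.length - u.length]'hlt := by
        rw [List.getElem_append_right (by omega)]
        rw [List.getElem_append_left (by omega)]
      have hel2 : (a ++ c :: b)[a.length]'(heq ▸ hi) = c := by
        rw [List.getElem_append_right (by omega)]
        simp
      exact hc ((hel.symm.trans (h3.trans hel2)) ▸ List.getElem_mem hlt)

theorem pv_infix_intercalate_of_mem {x : List Char} {L : List (List Char)} (sep : List Char)
    (hx : x ∈ L) : x <:+: List.intercalate sep L := by
  induction L with
  | nil => simp at hx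
  | cons y ys ih =>
    rcases List.mem_cons.mp hx with h | h
    · subst h
      cases ys with
      | nil => simp [List.intercalate]
      | cons z zs =>
        rw [show List.intercalate sep (x :: z :: zs) = x ++ sep ++ List.intercalate sep (z :: zs) by
          simp [List.intercalate, List.intersperse]]
        rw [List.append_assoc]
        exact (List.prefix_append x _).isInfix
    · cases ys with
      | nil => simp at h
      | cons z zs =>
        rw [show List.intercalate sep (y :: z :: zs) = y ++ sep ++ List.intercalate sep (z :: zs) by
          simp [List.intercalate, List.intersperse]]
        exact (ih h).trans (List.suffix_append _ _).isInfix

-- q without the separator char is an infix of the ['c']-intercalation iff of some piece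
theorem pv_infix_intercalate_iff {q : List Char} {c : Char} {L : List (List Char)}
    (hc : c ∉ q) (hL : L ≠ []) :
    q <:+: List.intercalate [c] L ↔ ∃ x ∈ L, q <:+: x := by
  constructor
  · intro h
    induction L with
    | nil => exact absurd rfl hL
    | cons y ys ih =>
      cases ys with
      | nil =>
        simp [List.intercalate] at h
        exact ⟨y, by simp, h⟩
      | cons z zs =>
        rw [show List.intercalate [c] (y :: z :: zs) = y ++ c :: List.intercalate [c] (z :: zs) by
          simp [List.intercalate, List.intersperse]] at h
        rcases pv_infix_split hc h with h | h
        · exact ⟨y, by simp, h⟩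
        · obtain ⟨x, hx1, hx2⟩ := ih (by simp) h
          exact ⟨x, by simp [hx1], hx2⟩
  · rintro ⟨x, hx1, hx2⟩
    exact hx2.trans (pv_infix_intercalate_of_mem [c] hx1)

-- str.replace(old, '') with a single-char old is a filter
theorem pv_replace_go_filter (c : Char) : ∀ (fuel : Nat) (l acc : List Char), l.length ≤ fuel →
    PySem.Chars.replace.go [c] [] fuel l acc = acc.reverse ++ l.filter (fun x => !(x == c)) := by
  intro fuel
  induction fuel with
  | zero => intro l acc h; simp at h; simp [PySem.Chars.replace.go, h]
  | succ n ih =>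
    intro l acc h
    cases l with
    | nil => simp [PySem.Chars.replace.go]
    | cons a t =>
      simp only [PySem.Chars.replace.go]
      by_cases hac : a = c
      · subst hac
        simp only [List.isPrefixOf, BEq.rfl, Bool.true_and]
        rw [if_pos trivial]
        simp only [List.length_cons, List.length_nil, List.drop_succ_cons, List.drop_zero]
        rw [ih t ([].reverse ++ acc) (by simpa using h)]
        simp
      · have hbe : (c == a) = false := beq_eq_false_iff_ne.mpr (Ne.symm hac)
        have hbe2 : (a == c) = false := beq_eq_false_iff_ne.mpr hac
        simp only [List.isPrefixOf, hbe, Bool.false_and, Bool.false_eq_true, if_false]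
        rw [ih t (a :: acc) (by simpa using h)]
        simp [List.filter, hbe2]

theorem pv_replace_single_empty (s : List Char) (c : Char) :
    PySem.Chars.replace s [c] [] = s.filter (fun x => !(x == c)) := by
  rw [PySem.Chars.replace]
  simp only [List.isEmpty_cons, Bool.false_eq_true, if_false]
  exact pv_replace_go_filter c s.length s [] (le_refl _)

-- a normalized name never contains '/'
theorem pv_slash_not_mem (s : String) : '/' ∉ (pv_normalize s).toList := by
  have e1 : ("_" : String).toList = ['_'] := rfl
  have e2 : ("/" : String).toList = ['/'] := rfl
  have e3 : ("" : String).toList = ([] : List Char) := rfl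
  intro hmem
  simp only [pv_normalize, PySem.Str.replace, String.toList_ofList, e1, e2, e3,
    pv_replace_single_empty] at hmem
  have := (List.mem_filter.mp (List.mem_filter.mp hmem).1).2
  simp at this

-- A's classification condition equals B's hit predicate
theorem pv_cond_eq (model_names : List String) (q : String) (hq : '/' ∉ q.toList) :
    (PySem.Set.contains (PySem.Set.ofList (model_names.map pv_normalize)) q ||
      (PySem.Set.ofList (model_names.map pv_normalize)).any (fun name => PySem.Str.isIn q name))
    = (!model_names.isEmpty &&
        PySem.Str.isIn q (PySem.Str.join "/" (model_names.map pv_normalize))) := by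
  have hEmpty : (model_names.map pv_normalize).isEmpty = model_names.isEmpty := by
    cases model_names <;> simp
  rw [Bool.eq_iff_iff]
  have hmemset : ∀ x : String,
      x ∈ PySem.Set.ofList (model_names.map pv_normalize) ↔ x ∈ model_names.map pv_normalize :=
    fun x => PySem.Set.mem_ofList _ x
  constructor
  · intro h
    have hex : ∃ n ∈ model_names.map pv_normalize, q.toList <:+: n.toList := by
      rcases Bool.or_eq_true_iff.mp h with h | h
      · exact ⟨q, (hmemset q).mp (List.contains_iff_mem.mp h), List.infix_refl _⟩
      · obtain ⟨n, hn1, hn2⟩ := List.any_eq_true.mp h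
        exact ⟨n, (hmemset n).mp hn1, (PySem.Str.isIn_iff_infix _ _).mp hn2⟩
    obtain ⟨n, hn1, hn2⟩ := hex
    have hne : model_names.map pv_normalize ≠ [] := by intro he; rw [he] at hn1; simp at hn1
    rw [Bool.and_eq_true, Bool.not_eq_true', ← hEmpty, List.isEmpty_eq_false_iff]
    refine ⟨hne, ?_⟩
    rw [PySem.Str.isIn_iff_infix]
    rw [show (PySem.Str.join "/" (model_names.map pv_normalize)).toList
        = List.intercalate ['/'] ((model_names.map pv_normalize).map String.toList) by
      simp [PySem.Str.join, PySem.Chars.join, String.toList_ofList]]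
    rw [pv_infix_intercalate_iff hq (by simpa using hne)]
    exact ⟨n.toList, List.mem_map_of_mem hn1, hn2⟩
  · intro h
    rw [Bool.and_eq_true, Bool.not_eq_true', ← hEmpty, List.isEmpty_eq_false_iff] at h
    obtain ⟨hne, hin⟩ := h
    rw [PySem.Str.isIn_iff_infix] at hin
    rw [show (PySem.Str.join "/" (model_names.map pv_normalize)).toList
        = List.intercalate ['/'] ((model_names.map pv_normalize).map String.toList) by
      simp [PySem.Str.join, PySem.Chars.join, String.toList_ofList]] at hin
    rw [pv_infix_intercalate_iff hq (by simpa using hne)] at hin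
    obtain ⟨x, hx1, hx2⟩ := hin
    obtain ⟨n, hn1, rfl⟩ := List.mem_map.mp hx1
    apply Bool.or_eq_true_iff.mpr
    right
    exact List.any_eq_true.mpr ⟨n, (hmemset n).mpr hn1, (PySem.Str.isIn_iff_infix _ _).mpr hx2⟩

-- A's names loop is B's filter-then-map
theorem pv_names_loop (l : List String) : ∀ acc : List String,
    l.foldl (fun acc f => if PySem.Str.strip f ≠ "" then acc ++ [pv_extract_base f] else acc) acc
    = acc ++ (l.filter (fun f => PySem.Str.strip f != "")).map pv_extract_base := by
  induction l with
  | nil => intro acc; simp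
  | cons a t ih =>
    intro acc
    rw [List.foldl_cons, List.filter_cons]
    by_cases h : PySem.Str.strip a = ""
    · rw [if_neg (by simp [h]), if_neg (by simp [h]), ih]
    · rw [if_pos h, if_pos (by simp [h]), ih]
      simp

-- A's classification loop with an arbitrary Bool test is B's two filters
theorem pv_class_loop (hit : String → Bool) (l : List String) :
    ∀ m f : List String,
    l.foldl (fun (st : List String × List String) mid =>
        if PySem.Str.strip mid = "" then st
        else if hit mid then (st.1, st.2 ++ [mid]) else (st.1 ++ [mid], st.2)) (m, f)
    = (m ++ (l.filter (fun x => PySem.Str.strip x != "")).filter (fun x => !hit x),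
       f ++ (l.filter (fun x => PySem.Str.strip x != "")).filter hit) := by
  induction l with
  | nil => intro m f; simp
  | cons a t ih =>
    intro m f
    by_cases h : PySem.Str.strip a = ""
    · simp [List.foldl_cons, h, ih]
    · by_cases hh : hit a = true
      · simp [List.foldl_cons, h, hh, ih, List.filter_cons]
      · simp [List.foldl_cons, h, hh, ih, List.filter_cons]

-- ===== VERDICT (by name: the statement is the Claim_ definition above) =====
theorem find_missing_models_spec : Claim_equal_find_missing_models := by
  intro fl il _
  show find_missing_models fl il = find_missing_models_alt fl il
  simp only [find_missing_models, find_missing_models_alt, pv_names_loop fl [],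
    List.nil_append]
  set mn := (fl.filter (fun f => PySem.Str.strip f != "")).map pv_extract_base with hmn
  have hstep : (fun (st : List String × List String) model_id =>
      if PySem.Str.strip model_id = "" then st
      else
        if PySem.Set.contains (PySem.Set.ofList (mn.map pv_normalize))
            (pv_normalize (pv_extract_org_model model_id).2) then (st.1, st.2 ++ [model_id])
        else if (PySem.Set.ofList (mn.map pv_normalize)).any
            (fun name => PySem.Str.isIn (pv_normalize (pv_extract_org_model model_id).2) name) then
          (st.1, st.2 ++ [model_id])
        else (st.1 ++ [model_id], st.2))
      = (fun (st : List String × List String) mid =>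
        if PySem.Str.strip mid = "" then st
        else if pvB_hit mn (PySem.Str.join "/" (mn.map pv_normalize)) mid then
          (st.1, st.2 ++ [mid])
        else (st.1 ++ [mid], st.2)) := by
    funext st mid
    by_cases h0 : PySem.Str.strip mid = ""
    · simp [h0]
    · have hc := pv_cond_eq mn (pv_normalize (pv_extract_org_model mid).2) (pv_slash_not_mem _)
      rw [if_neg h0, if_neg h0]
      simp only [pvB_hit, ← hc]
      cases h1 : PySem.Set.contains (PySem.Set.ofList (mn.map pv_normalize))
          (pv_normalize (pv_extract_org_model mid).2) <;> simp [h1]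
  rw [hstep, pv_class_loop]
  simp
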